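-- pv_equiv track=rewrite | github.com/younghu-kim/rdl-resonant-detection | scripts/artin_s3_121.py | build_coeffs
-- ===== SOURCE A (Python) =====
-- def build_sieve(N_max):
--     """최소 소인수 체"""
--     spf = list(range(N_max + 1))
--     i = 2
--     while i * i <= N_max:
--         if spf[i] == i:
--             for j in range(i*i, N_max+1, i):
--                 if spf[j] == j:
--                     spf[j] = i
--         i += 1
--     return spf
--
-- def factorize(n, spf):
--     factors = {}
--     while n > 1:
--         p = spf[n]
--         factors[p] = factors.get(p, 0) + 1
--         n //= p
--     return factors
--
-- def frob_type(p):
--     """x³-x-1 mod p 분해형 → (a_p, det_p)"""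
--     if p == 23:
--         return (0, 0)   # 분기: 근사로 a_p=0 처리
--     cnt = sum(1 for a in range(p) if (pow(a, 3, p) - a - 1) % p == 0)
--     if cnt == 3:
--         return (2, 1)   # Frob=identity: trace=2, det=1
--     elif cnt == 1:
--         return (0, -1)  # Frob=transposition: trace=0, det=-1
--     else:
--         return (-1, 1)  # Frob=3-cycle: trace=-1, det=1
--
-- def a_pk(p, k, frob_cache):
--     """a_{p^k} — 점화식: a_{p^k} = a_p·a_{p^{k-1}} − det_p·a_{p^{k-2}}"""
--     if k == 0:
--         return 1
--     ap, dp = frob_cache[p]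
--     if k == 1:
--         return ap
--     prev2, prev1 = 1, ap
--     for _ in range(k - 1):
--         if dp == 0:
--             prev2, prev1 = prev1, 0
--         else:
--             prev2, prev1 = prev1, ap * prev1 - dp * prev2
--     return prev1
--
-- def build_coeffs(N_max):
--     """a_n 배열 구축 (곱셈성 이용)"""
--     spf = build_sieve(N_max)
--
--     # 소수별 Frobenius 데이터 캐시
--     frob_cache = {}
--     primes = set()
--     for i in range(2, N_max+1):
--         if spf[i] == i:
--             primes.add(i)
--             frob_cache[i] = frob_type(i)
--
--     a = [0] * (N_max + 1)
--     a[1] = 1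
--
--     for n in range(2, N_max + 1):
--         factors = factorize(n, spf)
--         val = 1
--         for p, k in factors.items():
--             val *= a_pk(p, k, frob_cache)
--         a[n] = val
--
--     return a, frob_cache
-- ===== SOURCE B (Python) =====
-- def build_sieve(N_max):
--     """smallest-prime-factor sieve (same helper as A; B needs the sieve too)"""
--     spf = list(range(N_max + 1))
--     i = 2
--     while i * i <= N_max:
--         if spf[i] == i:
--             for j in range(i*i, N_max+1, i):
--                 if spf[j] == j:
--                     spf[j] = i
--         i += 1
--     return spf
--
-- def frob_type(p):
--     """x^3 - x - 1 mod p splitting type -> (a_p, det_p)"""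
--     if p == 23:
--         return (0, 0)
--     cnt = 0
--     for r in range(p):
--         if r * r * r % p == (r + 1) % p:
--             cnt += 1
--     if cnt == 3:
--         return (2, 1)
--     if cnt == 1:
--         return (0, -1)
--     return (-1, 1)
--
-- def prime_power_coeff(p, k, frob_cache):
--     """closed form of the linear recurrence a_{p^k} = a_p*a_{p^{k-1}} - det_p*a_{p^{k-2}}"""
--     ap, dp = frob_cache[p]
--     if dp == 0:
--         return 1 if k == 0 else 0
--     if ap == 2:
--         return k + 1
--     if ap == 0:
--         return 1 if k % 2 == 0 else 0
--     return (1, -1, 0)[k % 3]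
--
-- def build_coeffs(N_max):
--     spf = build_sieve(N_max)
--     frob_cache = {}
--     for i in range(2, N_max + 1):
--         if spf[i] == i:
--             frob_cache[i] = frob_type(i)
--     a = [0, 1]
--     for n in range(2, N_max + 1):
--         seq = []
--         m = n
--         while m > 1:
--             seq.append(spf[m])
--             m //= spf[m]
--         val = 1
--         for p in dict.fromkeys(seq):
--             val *= prime_power_coeff(p, seq.count(p), frob_cache)
--         a.append(val)
--     return a, frob_cache
-- ===== Notes on version B (the rewrite author's own statement) =====
-- stated objective: alternative
-- what changed: B replaces A's per-n exponent dictionary plus O(k) linear-recurrence loop for a_{p^k} by collecting the spf-walk as a list grouped with dict.fromkeys/count and a closed form of the recurrence (k+1, parity, period-3 table), and builds the coefficient array by appending instead of writing into a preallocated list; the root-count scan per prime (the dominant cost) is shared, so no speedup is claimed.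
import Mathlib
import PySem

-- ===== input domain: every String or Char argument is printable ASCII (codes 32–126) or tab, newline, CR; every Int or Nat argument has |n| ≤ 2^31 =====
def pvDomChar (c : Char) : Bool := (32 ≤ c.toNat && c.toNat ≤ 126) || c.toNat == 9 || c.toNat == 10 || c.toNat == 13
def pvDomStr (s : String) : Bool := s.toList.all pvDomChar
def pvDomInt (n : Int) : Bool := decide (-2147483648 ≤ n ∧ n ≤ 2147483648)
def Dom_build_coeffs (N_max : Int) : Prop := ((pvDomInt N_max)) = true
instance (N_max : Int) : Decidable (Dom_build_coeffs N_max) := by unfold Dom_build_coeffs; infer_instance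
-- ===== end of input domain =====

-- B replaces A's per-n exponent dictionary and O(k) linear-recurrence loop by a factor list
-- with first-occurrence grouping and a closed form of the recurrence; same return value on N_max ≥ 1.

-- ===== PORT A =====
-- build_sieve: shared helper (Source B contains the identical function).
-- Python indices spf[i], spf[j] are always in range on reachable states (2 ≤ i, i*i ≤ N;
-- j ≤ N < len spf), so the total pyGetD/pySetD forms are exact here.
def sieve_loop (N : Int) (spf : List Int) (i : Int) : List Int :=
  if h : i * i ≤ N then
    let spf' :=
      if PySem.List.pyGetD spf i 0 == i then
        (PySem.List.pyRange (i*i) (N+1) i).foldl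
          (fun s j => if PySem.List.pyGetD s j 0 == j then PySem.List.pySetD s j i else s) spf
      else spf
    sieve_loop N spf' (i+1)
  else spf
termination_by (N + 1 - i).toNat
decreasing_by
  have hi : i ≤ N := by nlinarith [sq_nonneg i, sq_nonneg (i-1)]
  omega

def build_sieve (N_max : Int) : List Int :=
  sieve_loop N_max (PySem.List.pyRange 0 (N_max+1)) 2

-- factorize(n, spf): the while-loop is ported with fuel n.toNat, which is exact on every
-- reachable state: each iteration divides n by spf[n] ≥ 2, so fewer than n iterations occur.
-- spf[n] is in range on reachable states (pyGetD's default is never used).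
def factorize (fuel : Nat) (n : Int) (spf : List Int) (d : PySem.Dict Int Int) : PySem.Dict Int Int :=
  match fuel with
  | 0 => d
  | fuel' + 1 =>
    if n > 1 then
      let p := PySem.List.pyGetD spf n 0
      factorize fuel' (PySem.Int.floordiv n p) spf (d.insert p (d.getD p 0 + 1))
    else d

def frob_type (p : Int) : Int × Int :=
  if p == 23 then (0, 0)
  else
    let cnt : Int := ((PySem.List.pyRange 0 p).map (fun a =>
      if PySem.Int.mod (PySem.Int.powMod a 3 p - a - 1) p == 0 then (1 : Int) else 0)).sum
    if cnt == 3 then (2, 1)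
    else if cnt == 1 then (0, -1)
    else (-1, 1)

-- a_pk(p, k, frob_cache): frob_cache[p] would raise KeyError on a missing key; that never
-- happens on reachable states (every spf value ≥ 2 is a key), so getD's default is never used.
def a_pk (p k : Int) (cache : PySem.Dict Int (Int × Int)) : Int :=
  if k == 0 then 1
  else
    let ad := (cache.get? p).getD (0, 0)
    if k == 1 then ad.1
    else
      ((PySem.List.pyRange 0 (k-1)).foldl
        (fun pr _ => if ad.2 == 0 then (pr.2, (0 : Int)) else (pr.2, ad.1 * pr.2 - ad.2 * pr.1))
        ((1 : Int), ad.1)).2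

-- a[1] = 1 raises IndexError when N_max ≤ 0 (excluded by Pre_); pySetD is exact on N_max ≥ 1.
def build_coeffs (N_max : Int) : List Int × (List (Int × Int × Int)) :=
  let spf := build_sieve N_max
  let sc := (PySem.List.pyRange 2 (N_max+1)).foldl
    (fun (sd : PySem.Set Int × PySem.Dict Int (Int × Int)) i =>
      if PySem.List.pyGetD spf i 0 == i then (PySem.Set.add sd.1 i, sd.2.insert i (frob_type i))
      else sd)
    (PySem.Set.empty, PySem.Dict.empty)
  let cache := sc.2
  let a0 := PySem.List.pySetD (List.replicate (N_max+1).toNat (0 : Int)) 1 1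
  let a := (PySem.List.pyRange 2 (N_max+1)).foldl
    (fun a n =>
      let factors := factorize n.toNat n spf PySem.Dict.empty
      let val := factors.items.foldl (fun v pk => v * a_pk pk.1 pk.2 cache) 1
      PySem.List.pySetD a n val) a0
  (a, cache.items)

-- ===== PORT B =====
-- the while-loop collecting the spf walk, same fuel convention as factorize above.
def walk (fuel : Nat) (m : Int) (spf : List Int) (seq : List Int) : List Int :=
  match fuel with
  | 0 => seq
  | fuel' + 1 =>
    if m > 1 then
      let p := PySem.List.pyGetD spf m 0
      walk fuel' (PySem.Int.floordiv m p) spf (seq ++ [p])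
    else seq

def frob_type_alt (p : Int) : Int × Int :=
  if p == 23 then (0, 0)
  else
    let cnt := (PySem.List.pyRange 0 p).foldl
      (fun c r => if PySem.Int.mod (r*r*r) p == PySem.Int.mod (r+1) p then c + 1 else c) (0 : Int)
    if cnt == 3 then (2, 1)
    else if cnt == 1 then (0, -1)
    else (-1, 1)

-- (1, -1, 0)[k % 3] and the k % 2 pick are ported as exhaustive branches on the
-- (nonnegative, since 2,3 > 0) remainder; frob_cache[p] as in a_pk above.
def prime_power_coeff (p k : Int) (cache : PySem.Dict Int (Int × Int)) : Int :=
  let ad := (cache.get? p).getD (0, 0)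
  if ad.2 == 0 then (if k == 0 then 1 else 0)
  else if ad.1 == 2 then k + 1
  else if ad.1 == 0 then (if PySem.Int.mod k 2 == 0 then 1 else 0)
  else
    if PySem.Int.mod k 3 == 0 then 1
    else if PySem.Int.mod k 3 == 1 then -1
    else 0

def build_coeffs_alt (N_max : Int) : List Int × (List (Int × Int × Int)) :=
  let spf := build_sieve N_max
  let cache := (PySem.List.pyRange 2 (N_max+1)).foldl
    (fun (d : PySem.Dict Int (Int × Int)) i =>
      if PySem.List.pyGetD spf i 0 == i then d.insert i (frob_type_alt i) else d)
    PySem.Dict.empty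
  let a := (PySem.List.pyRange 2 (N_max+1)).foldl
    (fun a n =>
      let seq := walk n.toNat n spf []
      let val := (PySem.List.dedup seq).foldl
        (fun v p => v * prime_power_coeff p ((List.count p seq : Nat) : Int) cache) 1
      a ++ [val]) [(0 : Int), 1]
  (a, cache.items)

-- ===== PRECONDITION & SPEC =====
-- A raises IndexError (a[1] = 1 on a list of length ≤ 1) exactly when N_max ≤ 0.
def Pre_build_coeffs (N_max : Int) : Prop := 1 ≤ N_max
instance (N_max : Int) : Decidable (Pre_build_coeffs N_max) := by unfold Pre_build_coeffs; infer_instance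
def pvWitness_build_coeffs : Int := 12

def Spec_build_coeffs (N_max : Int) (out : List Int × (List (Int × Int × Int))) : Prop := out = build_coeffs_alt N_max
instance (N_max : Int) (out : List Int × (List (Int × Int × Int))) : Decidable (Spec_build_coeffs N_max out) := by unfold Spec_build_coeffs; infer_instance

-- ===== CLAIM (what is proved, stated in full; the proofs are below) =====
def Claim_equal_build_coeffs : Prop := ∀ (N_max : Int), Dom_build_coeffs N_max → Pre_build_coeffs N_max → Spec_build_coeffs N_max (build_coeffs N_max)


-- ===== LEMMAS AND PROOFS =====

theorem pv_cond_eq (p a : Int) (hp : 0 < p) :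
    (PySem.Int.mod (PySem.Int.powMod a 3 p - a - 1) p == 0)
      = (PySem.Int.mod (a*a*a) p == PySem.Int.mod (a+1) p) := by
  rw [PySem.Int.powMod_eq_emod a 3 hp, PySem.Int.mod_eq_emod_of_pos hp,
      PySem.Int.mod_eq_emod_of_pos hp, PySem.Int.mod_eq_emod_of_pos hp]
  rw [Bool.eq_iff_iff]
  simp only [beq_iff_eq]
  have h : a ^ 3 % p - a - 1 = (a * a * a - (a + 1)) - p * (a ^ 3 / p) := by
    rw [Int.emod_def]; ring
  rw [Int.emod_eq_emod_iff_emod_sub_eq_zero, ← Int.dvd_iff_emod_eq_zero,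
      ← Int.dvd_iff_emod_eq_zero, h, dvd_sub_left (dvd_mul_right p (a ^ 3 / p))]

theorem pv_frob_eq (p : Int) : frob_type p = frob_type_alt p := by
  unfold frob_type frob_type_alt
  by_cases h23 : (p == 23) = true
  · simp [h23]
  · simp only [h23, if_false, Bool.false_eq_true]
    have hcnt : ((PySem.List.pyRange 0 p).map (fun a =>
        if PySem.Int.mod (PySem.Int.powMod a 3 p - a - 1) p == 0 then (1 : Int) else 0)).sum
        = (PySem.List.pyRange 0 p).foldl
          (fun c r => if PySem.Int.mod (r*r*r) p == PySem.Int.mod (r+1) p then c + 1 else c) (0 : Int) := by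
      rw [PySem.List.sum_map_ite_one_zero, PySem.List.foldl_count_if]
      rw [zero_add]
      congr 1
      apply List.countP_congr
      intro a ha
      have := (PySem.List.mem_pyRange_one).mp ha
      rw [pv_cond_eq p a (by omega)]
    rw [hcnt]
theorem pv_cache_snd_eq (spf : List Int) (l : List Int) :
    ∀ (s : PySem.Set Int) (d : PySem.Dict Int (Int × Int)),
      (l.foldl (fun sd i =>
          if PySem.List.pyGetD spf i 0 == i then (PySem.Set.add sd.1 i, sd.2.insert i (frob_type i))
          else sd) (s, d)).2
        = l.foldl (fun d i =>
            if PySem.List.pyGetD spf i 0 == i then d.insert i (frob_type_alt i) else d) d := by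
  induction l with
  | nil => intro s d; rfl
  | cons x xs ih =>
    intro s d
    simp only [List.foldl_cons]
    by_cases hx : (PySem.List.pyGetD spf x 0 == x) = true
    · simp only [hx, if_true]
      rw [ih]
      simp only [pv_frob_eq]
    · simp only [hx, if_false, Bool.false_eq_true, ih]

def pvGoodPairs : List (Int × Int) := [(0, 0), (2, 1), (0, -1), (-1, 1)]

theorem pv_frob_alt_mem (x : Int) : frob_type_alt x ∈ pvGoodPairs := by
  unfold frob_type_alt
  split_ifs <;> (try simp [pvGoodPairs]) <;> (split_ifs <;> simp_all)

theorem pv_cache_good (spf : List Int) (l : List Int) :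
    ∀ (d : PySem.Dict Int (Int × Int)), (∀ q, (d.get? q).getD (0, 0) ∈ pvGoodPairs) →
      ∀ q, (((l.foldl (fun d i =>
          if PySem.List.pyGetD spf i 0 == i then d.insert i (frob_type_alt i) else d) d)).get? q).getD (0, 0)
            ∈ pvGoodPairs := by
  induction l with
  | nil => intro d hd q; exact hd q
  | cons x xs ih =>
    intro d hd q
    simp only [List.foldl_cons]
    apply ih
    intro q'
    by_cases hx : (PySem.List.pyGetD spf x 0 == x) = true
    · simp only [hx, if_true]
      rw [PySem.Dict.get?_insert]
      by_cases hq : q' = x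
      · simp [hq, pv_frob_alt_mem]
      · simp [hq, hd q']
    · simp only [hx, if_false, Bool.false_eq_true]
      exact hd q'

theorem pv_foldl_const_iterate {α β : Type} (F : α → α) (l : List β) (init : α) :
    l.foldl (fun s _ => F s) init = F^[l.length] init := by
  induction l generalizing init with
  | nil => rfl
  | cons x xs ih => simp [List.foldl_cons, ih, Function.iterate_succ_apply]

theorem pv_walk_acc (fuel : Nat) : ∀ (m : Int) (spf seq : List Int),
    walk fuel m spf seq = seq ++ walk fuel m spf [] := by
  induction fuel with
  | zero => intro m spf seq; simp [walk]
  | succ f ih =>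
    intro m spf seq
    simp only [walk]
    by_cases hm : m > 1
    · simp only [hm, if_true]
      rw [ih _ _ (seq ++ _), ih _ _ ([] ++ _)]
      simp
    · simp [hm]

theorem pv_factorize_eq_walk (fuel : Nat) : ∀ (m : Int) (spf : List Int) (d : PySem.Dict Int Int),
    factorize fuel m spf d
      = (walk fuel m spf []).foldl (fun d p => d.insert p (d.getD p 0 + 1)) d := by
  induction fuel with
  | zero => intro m spf d; simp [factorize, walk]
  | succ f ih =>
    intro m spf d
    simp only [factorize, walk]
    by_cases hm : m > 1
    · simp only [hm, if_true]
      rw [ih, pv_walk_acc f _ _ ([] ++ [_])]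
      simp
    · simp [hm]
theorem pv_it21 (t : Nat) :
    (fun pr : Int × Int => (pr.2, 2 * pr.2 - pr.1))^[t] (1, 2) = ((t : Int) + 1, (t : Int) + 2) := by
  induction t with
  | zero => norm_num
  | succ t ih =>
    rw [Function.iterate_succ_apply', ih]
    push_cast
    refine Prod.ext ?_ ?_ <;> simp <;> ring
theorem pv_it01 (t : Nat) :
    (fun pr : Int × Int => (pr.2, pr.1))^[t] (1, 0)
      = if t % 2 = 0 then ((1 : Int), (0 : Int)) else (0, 1) := by
  induction t with
  | zero => norm_num
  | succ t ih =>
    rw [Function.iterate_succ_apply', ih]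
    by_cases h : t % 2 = 0
    · have h' : ¬((t+1) % 2 = 0) := by omega
      simp [h, h']
    · have h' : (t+1) % 2 = 0 := by omega
      simp [h, h']

theorem pv_itm11 (t : Nat) :
    (fun pr : Int × Int => (pr.2, -pr.2 - pr.1))^[t] (1, -1)
      = if t % 3 = 0 then ((1 : Int), (-1 : Int)) else if t % 3 = 1 then (-1, 0) else (0, 1) := by
  induction t with
  | zero => norm_num
  | succ t ih =>
    rw [Function.iterate_succ_apply', ih]
    have h3 : t % 3 = 0 ∨ t % 3 = 1 ∨ t % 3 = 2 := by omega
    rcases h3 with h | h | h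
    · have h' : (t+1) % 3 = 1 := by omega
      norm_num [h, h']
    · have h' : (t+1) % 3 = 2 := by omega
      norm_num [h, h']
    · have h' : (t+1) % 3 = 0 := by omega
      norm_num [h, h']
theorem pv_apk_eq (p k : Int) (cache : PySem.Dict Int (Int × Int))
    (hS : ((cache.get? p).getD (0, 0)) ∈ pvGoodPairs) (hk : 0 ≤ k) :
    a_pk p k cache = prime_power_coeff p k cache := by
  unfold a_pk prime_power_coeff
  simp only [pvGoodPairs, List.mem_cons, List.not_mem_nil, or_false] at hS
  by_cases h0 : k = 0
  · rcases hS with h | h | h | h <;> rw [h] <;> norm_num [h0]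
  by_cases h1 : k = 1
  · rcases hS with h | h | h | h <;> rw [h] <;> norm_num [h1]
  have hk2 : 2 ≤ k := by omega
  have hlen : (PySem.List.pyRange 0 (k-1)).length = (k-1).toNat := by
    simp [PySem.List.length_pyRange_one]
  obtain ⟨t, ht⟩ : ∃ t : Nat, (k-1).toNat = t + 1 := ⟨(k-1).toNat - 1, by omega⟩
  have htk : (t : Int) = k - 2 := by omega
  rcases hS with h | h | h | h <;> rw [h] <;> norm_num [h0, h1]
  · -- (0,0)
    rw [pv_foldl_const_iterate (fun pr : Int × Int => (pr.2, (0:Int)))]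
    rw [hlen, ht, Function.iterate_succ_apply']
  · -- (2,1)
    rw [pv_foldl_const_iterate (fun pr : Int × Int => (pr.2, 2 * pr.2 - pr.1))]
    rw [hlen, pv_it21]
    simp
    omega
  · -- (0,-1)
    rw [pv_foldl_const_iterate (fun pr : Int × Int => (pr.2, pr.1))]
    rw [hlen, pv_it01]
    by_cases hp2 : (k.toNat - 1) % 2 = 0
    · have : ¬(2 ∣ k) := by omega
      simp [hp2, this]
    · have : 2 ∣ k := by omega
      simp [hp2, this]
  · -- (-1,1)
    rw [pv_foldl_const_iterate (fun pr : Int × Int => (pr.2, -pr.2 - pr.1))]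
    rw [hlen, pv_itm11]
    have h3 : (k.toNat - 1) % 3 = 0 ∨ (k.toNat - 1) % 3 = 1 ∨ (k.toNat - 1) % 3 = 2 := by omega
    rcases h3 with hp | hp | hp
    · have h1' : ¬(3 ∣ k) := by omega
      have h2' : k % 3 = 1 := by omega
      simp [hp, h1', h2']
    · have h1' : ¬(3 ∣ k) := by omega
      have h2' : ¬(k % 3 = 1) := by omega
      simp [hp, h1', h2']
    · have h1' : 3 ∣ k := by omega
      simp [hp, h1']
theorem pv_val_eq (spf : List Int) (cache : PySem.Dict Int (Int × Int))
    (hS : ∀ q, ((cache.get? q).getD (0, 0)) ∈ pvGoodPairs) (n : Int) :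
    (factorize n.toNat n spf PySem.Dict.empty).items.foldl
        (fun v pk => v * a_pk pk.1 pk.2 cache) 1
      = (PySem.List.dedup (walk n.toNat n spf [])).foldl
          (fun v p => v * prime_power_coeff p ((List.count p (walk n.toNat n spf [])) : Int) cache) 1 := by
  rw [pv_factorize_eq_walk, PySem.Dict.foldl_insert_getD_add_one_eq_counter,
      PySem.Dict.items_counter, List.foldl_map, PySem.List.dedup_eq_ofList]
  apply PySem.List.foldl_congr_mem
  intro acc x _
  rw [pv_apk_eq x _ cache (hS x) (by positivity)]
theorem pv_take_set (L : List Int) (n : Nat) (v : Int) (h : n < L.length) :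
    (L.set n v).take (n+1) = L.take n ++ [v] := by
  rw [List.set_eq_take_append_cons_drop, if_pos h]
  rw [List.take_append]
  simp [List.length_take, Nat.min_eq_left (Nat.le_of_lt h)]

theorem pv_set_fold (N : Int) (g : Int → Int) :
    ∀ (m : Int), 2 ≤ m → ∀ (L : List Int), L.length = (N+1).toNat →
      (PySem.List.pyRange m (N+1)).foldl (fun a n => PySem.List.pySetD a n (g n)) L
        = L.take m.toNat ++ (PySem.List.pyRange m (N+1)).map g := by
  have H : ∀ (fuel : Nat) (m : Int), (N+1-m).toNat ≤ fuel → 2 ≤ m →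
      ∀ (L : List Int), L.length = (N+1).toNat →
      (PySem.List.pyRange m (N+1)).foldl (fun a n => PySem.List.pySetD a n (g n)) L
        = L.take m.toNat ++ (PySem.List.pyRange m (N+1)).map g := by
    intro fuel
    induction fuel with
    | zero =>
      intro m hf hm L hL
      have hNm : N + 1 ≤ m := by omega
      rw [PySem.List.pyRange_one_eq_nil hNm]
      simp [List.take_of_length_le (by omega : L.length ≤ m.toNat)]
    | succ f ih =>
      intro m hf hm L hL
      by_cases hNm : N + 1 ≤ m
      · rw [PySem.List.pyRange_one_eq_nil hNm]
        simp [List.take_of_length_le (by omega : L.length ≤ m.toNat)]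
      · have hNm' : m < N + 1 := by omega
        rw [PySem.List.pyRange_one_cons hNm']
        simp only [List.foldl_cons, List.map_cons]
        rw [PySem.List.pySetD_of_nonneg _ _ (by omega : (0:Int) ≤ m)]
        rw [ih (m+1) (by omega) (by omega) _ (by simpa using hL)]
        have hmt : m.toNat < L.length := by omega
        have h1 : (m+1).toNat = m.toNat + 1 := by omega
        rw [h1, pv_take_set L m.toNat (g m) hmt]
        simp
  intro m hm L hL
  exact H _ m le_rfl hm L hL
theorem pv_a0_take (N : Int) (hN : 1 ≤ N) :
    (PySem.List.pySetD (List.replicate (N+1).toNat (0 : Int)) 1 1).take 2 = [0, 1] := by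
  rw [PySem.List.pySetD_of_nonneg _ _ (by omega : (0:Int) ≤ 1)]
  obtain ⟨K, hK⟩ : ∃ K, (N+1).toNat = K + 2 := ⟨(N+1).toNat - 2, by omega⟩
  rw [hK]
  simp [List.replicate_succ]


-- ===== VERDICT (by name: the statement is the Claim_ definition above) =====
theorem build_coeffs_spec : Claim_equal_build_coeffs := by
  intro N _ hpre
  have hN : (1:Int) ≤ N := hpre
  unfold Spec_build_coeffs
  simp only [build_coeffs, build_coeffs_alt]
  simp only [pv_cache_snd_eq]
  simp only [Prod.mk.injEq, and_true]
  have hS : ∀ q, (((PySem.List.pyRange 2 (N+1)).foldl (fun d i =>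
      if PySem.List.pyGetD (build_sieve N) i 0 == i then d.insert i (frob_type_alt i) else d)
      PySem.Dict.empty).get? q).getD (0, 0) ∈ pvGoodPairs := by
    apply pv_cache_good
    intro q
    simp [PySem.Dict.get?_empty, pvGoodPairs]
  rw [pv_set_fold N _ 2 (by norm_num) _
      (by simp [PySem.List.length_pySetD, List.length_replicate])]
  rw [PySem.List.foldl_append_singleton_eq_map]
  rw [show ((2:Int).toNat) = 2 from rfl, pv_a0_take N hN]
  congr 1
  apply List.map_congr_left
  intro n _
  exact pv_val_eq _ _ hS n
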